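-- pv_equiv track=rewrite | github.com/soundwow-ad/sec-manager | services_ragic_import.py | _hour_priority_for_allowed
-- ===== SOURCE A (Python) =====
-- HOUR_COLUMNS = [6, 7, 8, 9, 10, 11, 12, 13, 14, 15, 16, 17, 18, 19, 20, 21, 22, 23, 0, 1]
--
-- HOUR_PRIORITY = [8, 16, 20, 12, 10, 14, 18, 22, 7, 9, 11, 13, 15, 17, 19, 21, 23, 6]
--
-- NO_SCHEDULE_HOURS = {0, 1}
--
-- def _normalize_allowed_hours(hours: list[int] | None) -> list[int]:
--     out: list[int] = []
--     for h in list(hours or []):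
--         try:
--             hh = int(h)
--         except Exception:
--             continue
--         if 0 <= hh <= 23 and hh not in NO_SCHEDULE_HOURS and hh not in out:
--             out.append(hh)
--     return out
--
-- def _hour_priority_for_allowed(allowed_hours: list[int]) -> list[int]:
--     allowed = _normalize_allowed_hours(allowed_hours)
--     if not allowed:
--         allowed = [h for h in HOUR_COLUMNS if h not in NO_SCHEDULE_HOURS]
--     ordered: list[int] = []
--     for h in HOUR_PRIORITY:
--         if h in allowed and h not in ordered:
--             ordered.append(h)
--     for h in allowed:
--         if h not in ordered:
--             ordered.append(h)
--     return ordered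
-- ===== SOURCE B (Python) =====
-- HOUR_COLUMNS = [6, 7, 8, 9, 10, 11, 12, 13, 14, 15, 16, 17, 18, 19, 20, 21, 22, 23, 0, 1]
--
-- HOUR_PRIORITY = [8, 16, 20, 12, 10, 14, 18, 22, 7, 9, 11, 13, 15, 17, 19, 21, 23, 6]
--
-- NO_SCHEDULE_HOURS = {0, 1}
--
-- def _normalize_allowed_hours(hours):
--     out = []
--     for h in list(hours or []):
--         try:
--             hh = int(h)
--         except Exception:
--             continue
--         if 0 <= hh <= 23 and hh not in NO_SCHEDULE_HOURS and hh not in out: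
--             out.append(hh)
--     return out
--
-- def _hour_priority_for_allowed(allowed_hours):
--     allowed = _normalize_allowed_hours(allowed_hours)
--     if not allowed:
--         allowed = [h for h in HOUR_COLUMNS if h not in NO_SCHEDULE_HOURS]
--     rank = {h: i for i, h in enumerate(HOUR_PRIORITY)}
--     return sorted(allowed, key=lambda h: rank.get(h, len(HOUR_PRIORITY)))
-- ===== Notes on version B (the rewrite author's own statement) =====
-- stated objective: simpler
-- what changed: A's two sequential passes (scan HOUR_PRIORITY filtering by membership in allowed, then scan allowed filtering by membership in the growing output) are replaced by a single stable sort of the normalized allowed list keyed by a rank table built once from HOUR_PRIORITY, with non-priority hours sharing the default rank so stability keeps their input order.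
import Mathlib
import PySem

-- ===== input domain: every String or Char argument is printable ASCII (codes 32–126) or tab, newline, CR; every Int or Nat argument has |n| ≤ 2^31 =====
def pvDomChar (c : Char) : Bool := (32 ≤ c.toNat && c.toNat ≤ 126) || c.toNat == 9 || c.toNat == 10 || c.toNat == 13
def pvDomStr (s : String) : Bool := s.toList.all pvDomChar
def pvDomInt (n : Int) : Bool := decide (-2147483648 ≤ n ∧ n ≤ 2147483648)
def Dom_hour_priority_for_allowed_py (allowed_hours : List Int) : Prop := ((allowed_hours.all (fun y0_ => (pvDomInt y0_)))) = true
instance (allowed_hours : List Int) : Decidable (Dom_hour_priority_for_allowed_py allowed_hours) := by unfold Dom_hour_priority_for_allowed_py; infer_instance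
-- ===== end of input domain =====

-- B replaces A's two sequential membership-scanning passes with a single stable sort keyed by a rank table built from HOUR_PRIORITY (objective: simpler).


-- ===== PORT A =====
def pvHOUR_COLUMNS : List Int := [6, 7, 8, 9, 10, 11, 12, 13, 14, 15, 16, 17, 18, 19, 20, 21, 22, 23, 0, 1]

def pvHOUR_PRIORITY : List Int := [8, 16, 20, 12, 10, 14, 18, 22, 7, 9, 11, 13, 15, 17, 19, 21, 23, 6]

-- NO_SCHEDULE_HOURS = {0, 1}: 'hh not in NO_SCHEDULE_HOURS' is ported as ¬(hh = 0 ∨ hh = 1).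
-- int(h) on an int argument is the identity and never raises, so the try/except contributes nothing here;
-- 'hours or []' is the identity on a list argument.  Helper shared verbatim by both Pythons.
def normalize_allowed_hours (hours : List Int) : List Int :=
  hours.foldl
    (fun out h =>
      if 0 ≤ h ∧ h ≤ 23 ∧ ¬(h = 0 ∨ h = 1) ∧ h ∉ out then out ++ [h] else out)
    []

def hour_priority_for_allowed_py (allowed_hours : List Int) : List Int :=
  let allowed0 := normalize_allowed_hours allowed_hours
  let allowed := if allowed0 = [] then pvHOUR_COLUMNS.filter (fun h => decide (¬(h = 0 ∨ h = 1))) else allowed0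
  let ordered1 := pvHOUR_PRIORITY.foldl
    (fun ordered h => if h ∈ allowed ∧ h ∉ ordered then ordered ++ [h] else ordered) []
  allowed.foldl (fun ordered h => if h ∉ ordered then ordered ++ [h] else ordered) ordered1

-- ===== PORT B =====
def hour_priority_for_allowed_py_alt (allowed_hours : List Int) : List Int :=
  let allowed0 := normalize_allowed_hours allowed_hours
  let allowed := if allowed0 = [] then pvHOUR_COLUMNS.filter (fun h => decide (¬(h = 0 ∨ h = 1))) else allowed0
  let rank : PySem.Dict Int Int :=
    (PySem.List.enumerate pvHOUR_PRIORITY).foldl (fun d p => d.insert p.2 p.1) PySem.Dict.empty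
  PySem.List.sorted allowed (fun h => rank.getD h (pvHOUR_PRIORITY.length : Int)) false

-- ===== PRECONDITION & SPEC =====
def Spec_hour_priority_for_allowed_py (allowed_hours : List Int) (out : List Int) : Prop := out = hour_priority_for_allowed_py_alt allowed_hours
instance (allowed_hours : List Int) (out : List Int) : Decidable (Spec_hour_priority_for_allowed_py allowed_hours out) := by unfold Spec_hour_priority_for_allowed_py; infer_instance

-- ===== CLAIM (what is proved, stated in full; the proofs are below) =====
def Claim_equal_hour_priority_for_allowed_py : Prop := ∀ (allowed_hours : List Int), Dom_hour_priority_for_allowed_py allowed_hours → Spec_hour_priority_for_allowed_py allowed_hours (hour_priority_for_allowed_py allowed_hours)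

-- ===== LEMMAS AND PROOFS =====

-- B's sort key, named for the proofs (definitionally the key lambda of the alt port)
def keyB : Int → Int := fun h =>
  ((PySem.List.enumerate pvHOUR_PRIORITY).foldl (fun d p => d.insert p.2 p.1) PySem.Dict.empty).getD h
    (pvHOUR_PRIORITY.length : Int)

theorem keyB_notmem : ∀ z, z ∉ pvHOUR_PRIORITY → keyB z = 18 := by
  intro z hz
  simp only [pvHOUR_PRIORITY, List.mem_cons, List.not_mem_nil, or_false, not_or] at hz
  show (Option.map (fun x => x.2) (List.find? (fun p => p.1 == z)
      ([(8, 0), (16, 1), (20, 2), (12, 3), (10, 4), (14, 5), (18, 6), (22, 7), (7, 8), (9, 9), (11, 10), (13, 11),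
        (15, 12), (17, 13), (19, 14), (21, 15), (23, 16), (6, 17)] : List (Int × Int)))).getD 18 = 18
  rw [List.find?_eq_none.mpr (fun q hq => by fin_cases hq <;> simp only [beq_iff_eq] <;> omega)]
  rfl

-- normalize's output has no duplicates
theorem normalize_nodup_aux (hours : List Int) :
    ∀ out : List Int, out.Nodup →
      (hours.foldl
        (fun out h =>
          if 0 ≤ h ∧ h ≤ 23 ∧ ¬(h = 0 ∨ h = 1) ∧ h ∉ out then out ++ [h] else out)
        out).Nodup := by
  induction hours with
  | nil => intro out h; simpa using h
  | cons h t ih =>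
    intro out hnd
    simp only [List.foldl_cons]
    split_ifs with hc
    · refine ih _ ?_
      simp only [List.nodup_append, List.nodup_cons, List.not_mem_nil, List.nodup_nil]
      refine ⟨hnd, by simp, ?_⟩
      intro a ha b hb
      rw [List.mem_singleton] at hb
      exact fun e => hc.2.2.2 (by rw [hb] at e; rwa [e] at ha)
    · exact ih _ hnd

theorem normalize_nodup (hours : List Int) : (normalize_allowed_hours hours).Nodup :=
  normalize_nodup_aux hours [] List.nodup_nil

-- A's first loop: folding a duplicate-free priority list appends exactly its members of L, in order
theorem loopA1 (L : List Int) :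
    ∀ (p acc : List Int), p.Nodup → (∀ h ∈ p, h ∉ acc) →
      p.foldl (fun ordered h => if h ∈ L ∧ h ∉ ordered then ordered ++ [h] else ordered) acc
        = acc ++ p.filter (fun h => decide (h ∈ L)) := by
  intro p
  induction p with
  | nil => intro acc _ _; simp
  | cons h t ih =>
    intro acc hnd hout
    simp only [List.nodup_cons] at hnd
    simp only [List.foldl_cons, List.filter_cons]
    by_cases hL : h ∈ L
    · rw [if_pos ⟨hL, hout h (by simp)⟩, ih (acc ++ [h]) hnd.2 ?_]
      · simp [hL]
      · intro x hx hmem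
        rcases List.mem_append.mp hmem with hmem | hmem
        · exact hout x (List.mem_cons_of_mem _ hx) hmem
        · exact hnd.1 (by rwa [List.mem_singleton.mp hmem] at hx)
    · rw [if_neg (by tauto), ih acc hnd.2 (fun x hx => hout x (by simp [hx]))]
      simp [hL]

-- A's second loop: with everything already present iff it is in p, it appends the non-p members
theorem loopA2 (p : List Int) :
    ∀ (l acc : List Int), l.Nodup →
      (∀ h ∈ l, h ∈ p → h ∈ acc) → (∀ h ∈ l, h ∉ p → h ∉ acc) →
      l.foldl (fun ordered h => if h ∉ ordered then ordered ++ [h] else ordered) acc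
        = acc ++ l.filter (fun h => decide (h ∉ p)) := by
  intro l
  induction l with
  | nil => intro acc _ _ _; simp
  | cons h t ih =>
    intro acc hnd h1 h2
    simp only [List.nodup_cons] at hnd
    simp only [List.foldl_cons, List.filter_cons]
    by_cases hp : h ∈ p
    · rw [if_neg (by simpa using h1 h (by simp) hp),
        ih acc hnd.2 (fun x hx => h1 x (by simp [hx])) (fun x hx => h2 x (by simp [hx]))]
      simp [hp]
    · rw [if_pos (h2 h (by simp) hp), ih (acc ++ [h]) hnd.2 ?_ ?_]
      · simp [hp]
      · intro x hx hxp
        simp [h1 x (by simp [hx]) hxp]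
      · intro x hx hxp hmem
        rcases List.mem_append.mp hmem with hmem | hmem
        · exact h2 x (by simp [hx]) hxp hmem
        · exact hnd.1 (by rwa [List.mem_singleton.mp hmem] at hx)

-- stable insertion places x after every key-≤ element and before every key-> element
theorem insertBy_middle (key : Int → Int) (x : Int) :
    ∀ (ys zs : List Int), (∀ y ∈ ys, ¬ key x < key y) → (∀ z ∈ zs, key x < key z) →
      PySem.List.insertBy (fun a b => decide (key a < key b)) x (ys ++ zs) = ys ++ x :: zs := by
  intro ys
  induction ys with
  | nil =>
    intro zs _ hz
    cases zs with
    | nil => simp [PySem.List.insertBy]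
    | cons z t => simp [PySem.List.insertBy, hz z (by simp)]
  | cons y ys ih =>
    intro zs hy hz
    simp only [List.cons_append, PySem.List.insertBy]
    rw [if_neg (by simpa using hy y (by simp))]
    rw [ih zs (fun a ha => hy a (by simp [ha])) hz]

-- the bucket characterisation of insertion sort under a priority key:
-- elements of p come first, in p's order, then the rest in input order
theorem foldl_insertBy_split (key : Int → Int) (p : List Int) (K : Int)
    (hp : p.Nodup) (hmono : p.Pairwise fun a b => key a < key b)
    (hK : ∀ z, z ∉ p → key z = K) (hlt : ∀ y ∈ p, key y < K) :
    ∀ L : List Int, L.Nodup →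
      L.foldl (fun acc x => PySem.List.insertBy (fun a b => decide (key a < key b)) x acc) []
        = p.filter (fun h => decide (h ∈ L)) ++ L.filter (fun h => decide (h ∉ p)) := by
  intro L
  induction L using List.reverseRecOn with
  | nil => simp
  | append_singleton L x ih =>
    intro hnd
    rw [List.nodup_append] at hnd
    have hndL : L.Nodup := hnd.1
    have hxL : x ∉ L := fun hx => hnd.2.2 x hx x (by simp) rfl
    rw [List.foldl_append, List.foldl_cons, List.foldl_nil, ih hndL]
    by_cases hxp : x ∈ p
    · obtain ⟨p1, p2, rfl⟩ := List.append_of_mem hxp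
      rw [List.nodup_append] at hp
      have hx1 : x ∉ p1 := fun h => hp.2.2 x h x (by simp) rfl
      have hx2 : x ∉ p2 := (List.nodup_cons.mp hp.2.1).1
      rw [List.pairwise_append] at hmono
      have hm1 : ∀ y ∈ p1, key y < key x := fun y hy => hmono.2.2 y hy x (by simp)
      have hm2 : ∀ z ∈ p2, key x < key z := (List.pairwise_cons.mp hmono.2.1).1
      have e1 : (p1 ++ x :: p2).filter (fun h => decide (h ∈ L ++ [x]))
          = (p1.filter (fun h => decide (h ∈ L))) ++ x :: (p2.filter (fun h => decide (h ∈ L))) := by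
        rw [List.filter_append, List.filter_cons]
        have c1 : p1.filter (fun h => decide (h ∈ L ++ [x])) = p1.filter (fun h => decide (h ∈ L)) := by
          refine List.filter_congr ?_
          intro a ha
          have hax : a ≠ x := fun e => hx1 (e ▸ ha)
          simp [hax]
        have c2 : p2.filter (fun h => decide (h ∈ L ++ [x])) = p2.filter (fun h => decide (h ∈ L)) := by
          refine List.filter_congr ?_
          intro a ha
          have hax : a ≠ x := fun e => hx2 (e ▸ ha)
          simp [hax]
        rw [c1, c2]
        simp
      have e2 : (L ++ [x]).filter (fun h => decide (h ∉ p1 ++ x :: p2))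
          = L.filter (fun h => decide (h ∉ p1 ++ x :: p2)) := by
        rw [List.filter_append]; simp
      rw [e1, e2, List.append_assoc]
      have step := insertBy_middle key x (p1.filter (fun h => decide (h ∈ L)))
          ((p2.filter (fun h => decide (h ∈ L))) ++ L.filter (fun h => decide (h ∉ p1 ++ x :: p2)))
          (fun y hy => by
            have := hm1 y (List.mem_of_mem_filter hy); omega)
          (fun z hz => by
            rcases List.mem_append.mp hz with hz | hz
            · exact hm2 z (List.mem_of_mem_filter hz)
            · have hzp : z ∉ p1 ++ x :: p2 := by
                have := List.of_mem_filter hz; simpa using this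
              rw [hK z hzp]; exact hlt x hxp)
      rw [List.filter_append (l₁ := p1), List.append_assoc,
        show (x :: p2).filter (fun h => decide (h ∈ L)) = p2.filter (fun h => decide (h ∈ L)) from by
          simp [hxL]]
      simpa using step
    · have e1 : p.filter (fun h => decide (h ∈ L ++ [x])) = p.filter (fun h => decide (h ∈ L)) := by
        refine List.filter_congr ?_
        intro a ha
        have hax : a ≠ x := fun e => hxp (e ▸ ha)
        simp [hax]
      have e2 : (L ++ [x]).filter (fun h => decide (h ∉ p))
          = L.filter (fun h => decide (h ∉ p)) ++ [x] := by
        rw [List.filter_append]; simp [hxp]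
      rw [e1, e2, ← List.append_assoc]
      have step := insertBy_middle key x
          (p.filter (fun h => decide (h ∈ L)) ++ L.filter (fun h => decide (h ∉ p))) []
          (fun y hy => by
            rcases List.mem_append.mp hy with hy | hy
            · have := hlt y (List.mem_of_mem_filter hy)
              have := hK x hxp; omega
            · have hyp : y ∉ p := by
                have := List.of_mem_filter hy; simpa using this
              rw [hK y hyp, hK x hxp]; omega)
          (by simp)
      simpa using step

-- the two programs agree on any duplicate-free working list
theorem core (allowed : List Int) (hnd : allowed.Nodup) :
    allowed.foldl (fun ordered h => if h ∉ ordered then ordered ++ [h] else ordered)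
      (pvHOUR_PRIORITY.foldl (fun ordered h => if h ∈ allowed ∧ h ∉ ordered then ordered ++ [h] else ordered) [])
      = PySem.List.sorted allowed keyB false := by
  rw [loopA1 allowed pvHOUR_PRIORITY [] (by decide) (by simp), List.nil_append]
  rw [loopA2 pvHOUR_PRIORITY allowed (pvHOUR_PRIORITY.filter (fun h => decide (h ∈ allowed))) hnd
      (fun h hmem hp => List.mem_filter.mpr ⟨hp, by simpa using hmem⟩)
      (fun h _ hp contra => hp (List.mem_filter.mp contra).1)]
  rw [PySem.List.sorted_eq_foldl_insertBy,
    foldl_insertBy_split keyB pvHOUR_PRIORITY 18 (by decide) (by decide) keyB_notmem (by decide) allowed hnd]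

-- ===== VERDICT (by name: the statement is the Claim_ definition above) =====
theorem hour_priority_for_allowed_py_spec : Claim_equal_hour_priority_for_allowed_py := by
  intro allowed_hours _
  have hnd : (if normalize_allowed_hours allowed_hours = []
      then pvHOUR_COLUMNS.filter (fun h => decide (¬(h = 0 ∨ h = 1)))
      else normalize_allowed_hours allowed_hours).Nodup := by
    split_ifs
    · decide
    · exact normalize_nodup allowed_hours
  exact core _ hnd
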